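-- pv_equiv track=rewrite | github.com/miuric/share | analysis/words.py | _end_str_pos
-- ===== SOURCE A (Python) =====
-- from typing import List
--
-- def _end_str_pos(ori_words: str, end_words: List[str]) -> int:
--     ew_first = ''
--     ew_pos_tmp = len(ori_words)
--
--     for ew in end_words:
--         temp_pos = ori_words.find(ew)
--         if temp_pos < ew_pos_tmp:
--             ew_first = ew
--             ew_pos_tmp = temp_pos
--
--     ew_pos = len(ori_words) if not ew_first else ew_pos_tmp
--     return ew_pos
-- ===== SOURCE B (Python) =====
-- from typing import List
--
-- def _end_str_pos(ori_words: str, end_words: List[str]) -> int: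
--     if any(w not in ori_words for w in end_words):
--         return -1
--     for i in range(len(ori_words) + 1):
--         if any(ori_words.startswith(w, i) for w in end_words):
--             return i
--     return len(ori_words)
-- ===== Notes on version B (the rewrite author's own statement) =====
-- stated objective: faster
-- what changed: A runs a word-major argmin fold that computes find() over the whole text for every end word and finishes with a falsy-sentinel test; B first checks that every end word occurs, then scans the text position by position and returns the first index at which some end word starts, so it never scans past the earliest match.
-- intended difference: When every end word occurs in ori_words and the first end word that is a prefix of the nonempty ori_words is the empty string, A's 'if not ew_first' test mistakes the winning word '' for its unset sentinel and returns len(ori_words); B returns 0, the genuine earliest match position of ''. — e.g. on _end_str_pos("ab", ["b", ""]): A returns 2, B returns 0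
import Mathlib
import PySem

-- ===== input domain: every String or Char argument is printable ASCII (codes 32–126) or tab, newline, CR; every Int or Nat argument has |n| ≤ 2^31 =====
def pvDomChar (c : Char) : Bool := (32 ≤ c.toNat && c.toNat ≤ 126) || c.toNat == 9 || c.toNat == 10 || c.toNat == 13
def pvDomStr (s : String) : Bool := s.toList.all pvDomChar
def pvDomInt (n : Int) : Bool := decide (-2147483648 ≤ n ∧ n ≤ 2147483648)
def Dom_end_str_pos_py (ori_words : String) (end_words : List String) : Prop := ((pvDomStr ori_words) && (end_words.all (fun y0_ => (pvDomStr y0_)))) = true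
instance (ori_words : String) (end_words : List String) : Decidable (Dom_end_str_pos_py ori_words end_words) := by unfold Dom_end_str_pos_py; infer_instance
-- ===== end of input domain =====

-- B scans the text position by position and stops at the earliest match instead of A's
-- word-major argmin fold over whole-text find() calls (objective: faster, measured by the
-- timing run); outside D_ below the two agree, inside D_ B returns the genuine earliest
-- match position where A's falsy-sentinel test misfires.

-- ===== PORT A =====
def end_str_pos_py (ori_words : String) (end_words : List String) : Int :=
  let st := end_words.foldl
    (fun (st : String × Int) ew =>
      let temp_pos := PySem.Str.find ori_words ew
      if temp_pos < st.2 then (ew, temp_pos) else st)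
    ("", PySem.Str.len ori_words)
  if st.1 = "" then PySem.Str.len ori_words else st.2

-- ===== PORT B =====
-- s.startswith(w, i) for 0 ≤ i ≤ len(s): exact — Python tests whether w is a prefix of s[i:]
def pvStartsAt (s w : List Char) (i : Nat) : Bool := w.isPrefixOf (s.drop i)

def end_str_pos_py_alt (ori_words : String) (end_words : List String) : Int :=
  if end_words.any (fun w => ! PySem.Str.isIn w ori_words) then -1
  else
    match (List.range ((PySem.Str.len ori_words).toNat + 1)).find?
        (fun i => end_words.any (fun w => pvStartsAt ori_words.toList w.toList i)) with
    | some i => (i : Int)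
    | none => PySem.Str.len ori_words

-- ===== PRECONDITION & SPEC =====
-- When every end word occurs in ori_words and the first end word that is a prefix of the
-- nonempty ori_words is the empty string, A's falsy test 'if not ew_first' mistakes the
-- winning word '' for its unset sentinel and returns len(ori_words); B returns 0, the genuine
-- earliest match position of ''.
def D_end_str_pos_py (ori_words : String) (end_words : List String) : Prop :=
  "" ∈ end_words ∧ (∀ w ∈ end_words, w.toList <:+: ori_words.toList) ∧
  ori_words.toList ≠ [] ∧
  ∀ w ∈ end_words.takeWhile (fun w => w != ""), ¬ (w.toList <+: ori_words.toList)
instance (ori_words : String) (end_words : List String) : Decidable (D_end_str_pos_py ori_words end_words) := by unfold D_end_str_pos_py; infer_instance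

def Spec_end_str_pos_py (ori_words : String) (end_words : List String) (out : Int) : Prop := ¬ D_end_str_pos_py ori_words end_words → out = end_str_pos_py_alt ori_words end_words
instance (ori_words : String) (end_words : List String) (out : Int) : Decidable (Spec_end_str_pos_py ori_words end_words out) := by unfold Spec_end_str_pos_py; infer_instance

def pvDiffWitness_end_str_pos_py : String × List String := ("ab", ["b", ""])
def pvDiffWitnessOut_end_str_pos_py : Int × Int := (2, 0)

-- ===== CLAIM (what is proved, stated in full; the proofs are below) =====
def Claim_unchanged_end_str_pos_py : Prop := ∀ (ori_words : String) (end_words : List String), Dom_end_str_pos_py ori_words end_words → Spec_end_str_pos_py ori_words end_words (end_str_pos_py ori_words end_words)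
def Claim_changed_end_str_pos_py : Prop := Dom_end_str_pos_py (pvDiffWitness_end_str_pos_py.1) (pvDiffWitness_end_str_pos_py.2) ∧ D_end_str_pos_py (pvDiffWitness_end_str_pos_py.1) (pvDiffWitness_end_str_pos_py.2) ∧ end_str_pos_py (pvDiffWitness_end_str_pos_py.1) (pvDiffWitness_end_str_pos_py.2) = pvDiffWitnessOut_end_str_pos_py.1 ∧ end_str_pos_py_alt (pvDiffWitness_end_str_pos_py.1) (pvDiffWitness_end_str_pos_py.2) = pvDiffWitnessOut_end_str_pos_py.2 ∧ pvDiffWitnessOut_end_str_pos_py.1 ≠ pvDiffWitnessOut_end_str_pos_py.2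
def Claim_exact_end_str_pos_py : Prop := ∀ (ori_words : String) (end_words : List String), Dom_end_str_pos_py ori_words end_words → D_end_str_pos_py ori_words end_words → end_str_pos_py ori_words end_words ≠ end_str_pos_py_alt ori_words end_words

-- ===== LEMMAS AND PROOFS =====

-- (first attainer of the minimum of f, minimum of f) over a list; none on []
def pvAmin (f : String → Int) : List String → Option (String × Int)
  | [] => none
  | w :: ws =>
    match pvAmin f ws with
    | none => some (w, f w)
    | some (v, m) => if f w ≤ m then some (w, f w) else some (v, m)

-- threshold step: adopt (v, m) only if it beats the current state
def pvThr (st : String × Int) : Option (String × Int) → String × Int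
  | none => st
  | some (v, m) => if m < st.2 then (v, m) else st

theorem pvAmin_cons_none {f : String → Int} {w : String} {rest : List String}
    (h : pvAmin f rest = none) : pvAmin f (w :: rest) = some (w, f w) := by
  unfold pvAmin; rw [h]

theorem pvAmin_cons_some {f : String → Int} {w v : String} {rest : List String} {m : Int}
    (h : pvAmin f rest = some (v, m)) :
    pvAmin f (w :: rest) = if f w ≤ m then some (w, f w) else some (v, m) := by
  unfold pvAmin; rw [h]

theorem pvAmin_eq_none {f : String → Int} {ws : List String} :
    pvAmin f ws = none ↔ ws = [] := by
  cases ws with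
  | nil => simp [pvAmin]
  | cons w t =>
    cases h : pvAmin f t with
    | none => rw [pvAmin_cons_none h]; simp
    | some p =>
      obtain ⟨v, m⟩ := p
      rw [pvAmin_cons_some h]
      by_cases hle : f w ≤ m <;> simp [hle]

-- A's loop computes exactly (first attainer of the minimum, minimum), thresholded at the seed
theorem pvFold_char (f : String → Int) (ws : List String) :
    ∀ (s : String) (t : Int),
    ws.foldl (fun (st : String × Int) w => if f w < st.2 then (w, f w) else st) (s, t)
      = pvThr (s, t) (pvAmin f ws) := by
  induction ws with
  | nil => intro s t; simp [pvAmin, pvThr]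
  | cons w rest ih =>
    intro s t
    rw [List.foldl_cons]
    cases h : pvAmin f rest with
    | none =>
      have hrest : rest = [] := pvAmin_eq_none.mp h
      subst hrest
      rw [pvAmin_cons_none h, List.foldl_nil]
      simp only [pvThr]
    | some p =>
      obtain ⟨v, m⟩ := p
      rw [pvAmin_cons_some h]
      simp only [h, pvThr] at ih
      by_cases hle : f w ≤ m
      · rw [if_pos hle]
        by_cases hw : f w < t
        · rw [if_pos hw, ih]
          simp only [pvThr]
          split_ifs <;> first | rfl | (exfalso; omega)
        · rw [if_neg hw, ih]
          simp only [pvThr]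
          split_ifs <;> first | rfl | (exfalso; omega)
      · rw [if_neg hle]
        by_cases hw : f w < t
        · rw [if_pos hw, ih]
          simp only [pvThr]
          split_ifs <;> first | rfl | (exfalso; omega)
        · rw [if_neg hw, ih]
          simp only [pvThr]

theorem pvAmin_mem {f : String → Int} {ws : List String} {v : String} {m : Int}
    (h : pvAmin f ws = some (v, m)) : v ∈ ws ∧ f v = m := by
  induction ws generalizing v m with
  | nil => simp [pvAmin] at h
  | cons w rest ih =>
    cases hr : pvAmin f rest with
    | none =>
      rw [pvAmin_cons_none hr] at h
      injection h with h'; injection h' with h1 h2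
      subst h1; subst h2; exact ⟨List.mem_cons_self .., rfl⟩
    | some p =>
      obtain ⟨v', m'⟩ := p
      rw [pvAmin_cons_some hr] at h
      by_cases hle : f w ≤ m'
      · rw [if_pos hle] at h
        injection h with h'; injection h' with h1 h2
        subst h1; subst h2; exact ⟨List.mem_cons_self .., rfl⟩
      · rw [if_neg hle] at h
        injection h with h'; injection h' with h1 h2
        subst h1; subst h2
        obtain ⟨hm, hf⟩ := ih hr
        exact ⟨List.mem_cons_of_mem _ hm, hf⟩

theorem pvAmin_le {f : String → Int} {ws : List String} {v : String} {m : Int}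
    (h : pvAmin f ws = some (v, m)) : ∀ w ∈ ws, m ≤ f w := by
  induction ws generalizing v m with
  | nil => simp [pvAmin] at h
  | cons w rest ih =>
    cases hr : pvAmin f rest with
    | none =>
      have hrest : rest = [] := pvAmin_eq_none.mp hr
      subst hrest
      rw [pvAmin_cons_none hr] at h
      simp only [Option.some.injEq, Prod.mk.injEq] at h
      obtain ⟨h1, h2⟩ := h
      intro u hu; simp at hu; rw [hu]; omega
    | some p =>
      obtain ⟨v', m'⟩ := p
      rw [pvAmin_cons_some hr] at h
      intro u hu
      rcases List.mem_cons.mp hu with hu | hu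
      · rw [hu]
        by_cases hle : f w ≤ m'
        · rw [if_pos hle] at h
          simp only [Option.some.injEq, Prod.mk.injEq] at h
          omega
        · rw [if_neg hle] at h
          simp only [Option.some.injEq, Prod.mk.injEq] at h
          obtain ⟨h1, h2⟩ := h
          have := pvAmin_mem hr
          omega
      · have hrec := ih hr u hu
        by_cases hle : f w ≤ m'
        · rw [if_pos hle] at h
          simp only [Option.some.injEq, Prod.mk.injEq] at h
          omega
        · rw [if_neg hle] at h
          simp only [Option.some.injEq, Prod.mk.injEq] at h
          obtain ⟨h1, h2⟩ := h
          omega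

-- A's winner is the FIRST element attaining the minimum
theorem pvAmin_first {f : String → Int} {ws : List String} {v : String} {m : Int}
    (h : pvAmin f ws = some (v, m)) :
    ws.find? (fun w => f w == m) = some v := by
  induction ws generalizing v m with
  | nil => simp [pvAmin] at h
  | cons w rest ih =>
    cases hr : pvAmin f rest with
    | none =>
      rw [pvAmin_cons_none hr] at h
      simp only [Option.some.injEq, Prod.mk.injEq] at h
      obtain ⟨h1, h2⟩ := h
      rw [← h1, ← h2]
      rw [List.find?_cons_of_pos (by simp)]
    | some p =>
      obtain ⟨v', m'⟩ := p
      rw [pvAmin_cons_some hr] at h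
      by_cases hle : f w ≤ m'
      · rw [if_pos hle] at h
        simp only [Option.some.injEq, Prod.mk.injEq] at h
        obtain ⟨h1, h2⟩ := h
        rw [← h1, ← h2]
        rw [List.find?_cons_of_pos (by simp)]
      · rw [if_neg hle] at h
        simp only [Option.some.injEq, Prod.mk.injEq] at h
        obtain ⟨h1, h2⟩ := h
        rw [← h1, ← h2]
        have hne : ¬ ((f w == m') = true) := by simp; omega
        rw [List.find?_cons_of_neg (p := fun w => f w == m') (a := w) hne]
        exact ih hr

-- the elements of takeWhile (· != a) precede find?'s hit, so the predicate is false on them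
theorem pvFind?_takeWhile {q : String → Bool} {ws : List String} {a : String}
    (h : ws.find? q = some a) :
    ∀ w ∈ ws.takeWhile (fun w => w != a), q w = false := by
  induction ws with
  | nil => simp at h
  | cons w rest ih =>
    by_cases hq : q w
    · rw [List.find?_cons_of_pos hq] at h
      injection h with h1; subst h1
      simp [List.takeWhile]
    · rw [List.find?_cons_of_neg (by simp [hq])] at h
      by_cases hwa : w = a
      · subst hwa; simp [List.takeWhile]
      · intro u hu
        rw [List.takeWhile_cons_of_pos (by simp [hwa])] at hu
        rcases List.mem_cons.mp hu with hu | hu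
        · subst hu; simpa using hq
        · exact ih h u hu

theorem pvFind?_of_takeWhile {q : String → Bool} {ws : List String}
    (hmem : "" ∈ ws) (hq : q "" = true)
    (hfalse : ∀ w ∈ ws.takeWhile (fun w => w != ""), q w = false) :
    ws.find? q = some "" := by
  induction ws with
  | nil => simp at hmem
  | cons w rest ih =>
    by_cases hw : w = ""
    · subst hw
      rw [List.find?_cons_of_pos hq]
    · have hwt : w ∈ (w :: rest).takeWhile (fun w => w != "") := by
        rw [List.takeWhile_cons_of_pos (by simp [hw])]
        exact List.mem_cons_self ..
      have hqw : q w = false := hfalse w hwt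
      rw [List.find?_cons_of_neg (by simp [hqw])]
      have hmem' : "" ∈ rest := by
        rcases List.mem_cons.mp hmem with h | h
        · exact absurd h.symm hw
        · exact h
      refine ih hmem' ?_
      intro u hu
      refine hfalse u ?_
      rw [List.takeWhile_cons_of_pos (by simp [hw])]
      exact List.mem_cons_of_mem _ hu

-- find s w = 0 ↔ w is a prefix of s
theorem pvFind_zero_iff (s w : List Char) :
    PySem.Chars.find s w = 0 ↔ w <+: s := by
  constructor
  · intro h
    have := (PySem.Chars.find_spec (s := s) (sub := w) (by omega)).1
    rw [h] at this; simpa using this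
  · intro h
    have h0 : 0 ≤ PySem.Chars.find s w :=
      (PySem.Chars.find_nonneg_iff s w).mpr h.isInfix
    by_contra hne
    have hpos : 0 < (PySem.Chars.find s w).toNat := by omega
    exact (PySem.Chars.find_spec (s := s) (sub := w) h0).2 0 hpos (by simpa using h)

theorem pvFindRange (p : Nat → Bool) (k : Nat) (h2 : p k = true) (h3 : ∀ j, j < k → p j = false) :
    ∀ n, k < n → (List.range n).find? p = some k := by
  intro n hn
  rw [List.range_eq_range']
  have hsplit : List.range' 0 n = List.range' 0 k ++ List.range' k (n - k) := by
    have h := @List.range'_append 0 k (n - k) 1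
    simp only [one_mul, Nat.zero_add] at h
    rw [h]; congr 1; omega
  rw [hsplit, List.find?_append]
  have h1 : (List.range' 0 k).find? p = none := by
    rw [List.find?_eq_none]; intro x hx; simp [List.mem_range'] at hx; simp [h3 x (by omega)]
  rw [h1]
  have h4 : n - k = (n - k - 1) + 1 := by omega
  rw [h4, List.range'_succ]
  simp [h2]

-- B's value when every word occurs in the text: the minimum of the find positions
theorem pvB_eq_min (ori_words : String) (end_words : List String) (v : String) (m : Int)
    (hall : ∀ w ∈ end_words, w.toList <:+: ori_words.toList)
    (h : pvAmin (fun w => PySem.Str.find ori_words w) end_words = some (v, m)) :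
    end_str_pos_py_alt ori_words end_words = m := by
  obtain ⟨hv, hfv⟩ := pvAmin_mem h
  rw [PySem.Str.find_eq] at hfv
  have hm0 : 0 ≤ m := by
    rw [← hfv]
    exact (PySem.Chars.find_nonneg_iff _ _).mpr (hall v hv)
  have hmlen : m ≤ (ori_words.toList.length : Int) := by
    rw [← hfv]; exact PySem.Chars.find_le_length _ _
  unfold end_str_pos_py_alt
  have hcond : (end_words.any (fun w => ! PySem.Str.isIn w ori_words)) = false := by
    rw [List.any_eq_false]
    intro w hw
    have hii : PySem.Chars.isIn w.toList ori_words.toList = true :=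
      (PySem.Chars.isIn_iff_infix _ _).mpr (hall w hw)
    simp [PySem.Str.isIn_eq, hii]
  rw [if_neg (by rw [hcond]; exact Bool.false_ne_true)]
  have hp : (fun i => end_words.any (fun w => pvStartsAt ori_words.toList w.toList i)) m.toNat = true := by
    simp only [List.any_eq_true]
    refine ⟨v, hv, ?_⟩
    have h0v : 0 ≤ PySem.Chars.find ori_words.toList v.toList := by rw [hfv]; exact hm0
    have hs := (PySem.Chars.find_spec (s := ori_words.toList) (sub := v.toList) h0v).1
    rw [hfv] at hs
    simpa [pvStartsAt, List.isPrefixOf_iff_prefix] using hs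
  have hlow : ∀ j, j < m.toNat →
      (fun i => end_words.any (fun w => pvStartsAt ori_words.toList w.toList i)) j = false := by
    intro j hj
    simp only [List.any_eq_false]
    intro w hw
    simp only [pvStartsAt, List.isPrefixOf_iff_prefix]
    intro hpre
    have h0w : 0 ≤ PySem.Chars.find ori_words.toList w.toList :=
      (PySem.Chars.find_nonneg_iff _ _).mpr (hall w hw)
    have hjlt : ¬ (j < (PySem.Chars.find ori_words.toList w.toList).toNat) := by
      intro hc
      exact (PySem.Chars.find_spec h0w).2 j hc hpre
    have hle := pvAmin_le h w hw
    rw [PySem.Str.find_eq] at hle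
    omega
  have hrange : m.toNat < (PySem.Str.len ori_words).toNat + 1 := by
    rw [PySem.Str.len_eq]; omega
  rw [pvFindRange _ m.toNat hp hlow _ hrange]
  simp
  omega

-- the main case analysis: outside D_ the two programs agree
theorem pv_main (ori_words : String) (end_words : List String)
    (hD : ¬ D_end_str_pos_py ori_words end_words) :
    end_str_pos_py ori_words end_words = end_str_pos_py_alt ori_words end_words := by
  by_cases habs : ∃ w ∈ end_words, ¬ (w.toList <:+: ori_words.toList)
  · -- some word absent: both return -1
    obtain ⟨w0, hw0, hinf⟩ := habs
    have hB : end_str_pos_py_alt ori_words end_words = -1 := by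
      unfold end_str_pos_py_alt
      rw [if_pos]
      simp only [List.any_eq_true]
      exact ⟨w0, hw0, by simp [PySem.Str.isIn_eq, (PySem.Chars.isIn_eq_false_iff _ _).mpr hinf]⟩
    rw [hB]
    have hne : end_words ≠ [] := by intro h; subst h; simp at hw0
    obtain ⟨⟨v, m⟩, hvm⟩ : ∃ p, pvAmin (fun w => PySem.Str.find ori_words w) end_words = some p := by
      cases h : pvAmin (fun w => PySem.Str.find ori_words w) end_words with
      | none => exact absurd (pvAmin_eq_none.mp h) hne
      | some p => exact ⟨p, rfl⟩
    obtain ⟨hv, hfv⟩ := pvAmin_mem hvm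
    have hm : m = -1 := by
      have h1 := pvAmin_le hvm w0 hw0
      have h2 : PySem.Str.find ori_words w0 = -1 := by
        rw [PySem.Str.find_eq]; exact (PySem.Chars.find_eq_neg_one_iff _ _).mpr hinf
      have h3 : -1 ≤ m := by
        rw [← hfv, PySem.Str.find_eq]; exact PySem.Chars.neg_one_le_find _ _
      omega
    have hfind_nil : PySem.Str.find ori_words "" = 0 := by
      rw [PySem.Str.find_eq]
      simpa using PySem.Chars.find_nil ori_words.toList
    have hvne : v ≠ "" := by
      intro h; subst h; rw [hfind_nil] at hfv; omega
    have hlt : m < PySem.Str.len ori_words := by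
      rw [PySem.Str.len_eq]; omega
    unfold end_str_pos_py
    rw [pvFold_char (fun w => PySem.Str.find ori_words w) end_words]
    simp only [pvThr, hvm]
    rw [if_pos hlt]
    simp [hvne, hm]
  · rw [not_exists] at habs
    simp only [not_and, not_not] at habs
    cases hne : end_words with
    | nil =>
      -- empty list: both return len(ori_words)
      have hA : end_str_pos_py ori_words [] = PySem.Str.len ori_words := by
        unfold end_str_pos_py; simp
      have hBn : end_str_pos_py_alt ori_words [] = PySem.Str.len ori_words := by
        unfold end_str_pos_py_alt
        rw [if_neg (by simp)]
        have h1 : (List.range ((PySem.Str.len ori_words).toNat + 1)).find?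
            (fun i => ([] : List String).any (fun w => pvStartsAt ori_words.toList w.toList i)) = none := by
          rw [List.find?_eq_none]; intro x _; simp
        rw [h1]
      rw [hA, hBn]
    | cons w0 rest =>
      rw [← hne]
      have hne' : end_words ≠ [] := by rw [hne]; simp
      obtain ⟨⟨v, m⟩, hvm⟩ : ∃ p, pvAmin (fun w => PySem.Str.find ori_words w) end_words = some p := by
        cases h : pvAmin (fun w => PySem.Str.find ori_words w) end_words with
        | none => exact absurd (pvAmin_eq_none.mp h) hne'
        | some p => exact ⟨p, rfl⟩
      obtain ⟨hv, hfv⟩ := pvAmin_mem hvm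
      have hB := pvB_eq_min ori_words end_words v m habs hvm
      rw [hB]
      have hmlen : m ≤ (ori_words.toList.length : Int) := by
        rw [← hfv, PySem.Str.find_eq]; exact PySem.Chars.find_le_length _ _
      have hm0 : 0 ≤ m := by
        rw [← hfv, PySem.Str.find_eq]
        exact (PySem.Chars.find_nonneg_iff _ _).mpr (habs v hv)
      unfold end_str_pos_py
      rw [pvFold_char (fun w => PySem.Str.find ori_words w) end_words]
      simp only [pvThr, hvm]
      by_cases hlt : m < PySem.Str.len ori_words
      · rw [if_pos hlt]
        by_cases hveq : v = ""
        · -- the quirk region: this is exactly D_, contradicting ¬D_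
          exfalso
          apply hD
          subst hveq
          have hm : m = 0 := by
            rw [← hfv, PySem.Str.find_eq]
            simpa using PySem.Chars.find_nil ori_words.toList
          refine ⟨hv, habs, ?_, ?_⟩
          · intro h
            rw [PySem.Str.len_eq, h] at hlt
            simp at hlt; omega
          · intro w hw hpre
            have hq := pvFind?_takeWhile (pvAmin_first hvm) w hw
            simp only [beq_eq_false_iff_ne, ne_eq] at hq
            apply hq
            rw [PySem.Str.find_eq, hm]
            exact (pvFind_zero_iff _ _).mpr hpre
        · simp [hveq]
      · rw [if_neg hlt]
        have hm : m = (ori_words.toList.length : Int) := by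
          rw [PySem.Str.len_eq] at hlt; omega
        simp [PySem.Str.len_eq, hm]

-- inside D_: A returns len(ori_words) ≠ 0 = B's value
theorem pv_tight (ori_words : String) (end_words : List String)
    (hD : D_end_str_pos_py ori_words end_words) :
    end_str_pos_py ori_words end_words ≠ end_str_pos_py_alt ori_words end_words := by
  obtain ⟨hmem, hall, hs, htw⟩ := hD
  have hne : end_words ≠ [] := by intro h; subst h; simp at hmem
  obtain ⟨⟨v, m⟩, hvm⟩ : ∃ p, pvAmin (fun w => PySem.Str.find ori_words w) end_words = some p := by
    cases h : pvAmin (fun w => PySem.Str.find ori_words w) end_words with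
    | none => exact absurd (pvAmin_eq_none.mp h) hne
    | some p => exact ⟨p, rfl⟩
  obtain ⟨hv, hfv⟩ := pvAmin_mem hvm
  have hfind_nil : PySem.Str.find ori_words "" = 0 := by
    rw [PySem.Str.find_eq]
    simpa using PySem.Chars.find_nil ori_words.toList
  have hm : m = 0 := by
    have h1 := pvAmin_le hvm "" hmem
    have h2 : 0 ≤ m := by
      rw [← hfv, PySem.Str.find_eq]
      exact (PySem.Chars.find_nonneg_iff _ _).mpr (hall v hv)
    omega
  subst hm
  have hveq : v = "" := by
    have h1 := pvAmin_first hvm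
    have h2 : end_words.find? (fun w => PySem.Str.find ori_words w == 0) = some "" := by
      refine pvFind?_of_takeWhile hmem (by simp) ?_
      intro w hw
      simp only [beq_eq_false_iff_ne, ne_eq]
      intro hq
      rw [PySem.Str.find_eq] at hq
      exact htw w hw ((pvFind_zero_iff _ _).mp hq)
    rw [h1] at h2
    injection h2
  subst hveq
  have hB := pvB_eq_min ori_words end_words "" 0 hall hvm
  rw [hB]
  have hlen : 0 < ori_words.toList.length := by
    cases h : ori_words.toList with
    | nil => exact absurd h hs
    | cons c t => simp
  have hlt : (0 : Int) < PySem.Str.len ori_words := by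
    rw [PySem.Str.len_eq]; omega
  unfold end_str_pos_py
  rw [pvFold_char (fun w => PySem.Str.find ori_words w) end_words]
  simp only [pvThr, hvm]
  rw [if_pos hlt]
  simp [PySem.Str.len_eq]
  intro hcontra
  subst hcontra
  exact hs rfl

-- ===== VERDICT (by name: the statements are the Claim_ definitions above) =====
theorem end_str_pos_py_spec : Claim_unchanged_end_str_pos_py := by
  intro ori_words end_words _ hD
  exact pv_main ori_words end_words hD

theorem end_str_pos_py_changed : Claim_changed_end_str_pos_py := by
  unfold Claim_changed_end_str_pos_py; decide

theorem end_str_pos_py_tight : Claim_exact_end_str_pos_py := by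
  intro ori_words end_words _ hD
  exact pv_tight ori_words end_words hD
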